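-- pv_equiv track=rewrite | github.com/GizawAAiT/Codeforces | B_Cutting.py | max_cuts_bucket
-- ===== SOURCE A (Python) =====
-- def max_cuts_bucket(n: int, B: int, a: list[int]) -> int:
--     # bucket[c] = how many legal cuts have cost c
--     bucket = [0] * 101        # indices 0…100, we’ll use 1…99/100
--
--     odd = even = 0
--     for i in range(n - 1):
--         if a[i] & 1:
--             odd += 1
--         else:
--             even += 1
--         if odd == even:       # legal cut just after a[i]
--             cost = abs(a[i] - a[i + 1])
--             if cost <= B:     # costs > B can never be chosen
--                 bucket[cost] += 1
--
--     cuts = 0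
--     remaining = B
--     for cost in range(1, B + 1):       # ascending cost order
--         if bucket[cost]:
--             max_take = min(bucket[cost], remaining // cost)
--             cuts      += max_take
--             remaining -= max_take * cost
--             if remaining == 0:
--                 break
--     return cuts
-- ===== SOURCE B (Python) =====
-- def max_cuts_bucket(n: int, B: int, a: list[int]) -> int:
--     # one pass with a parity balance; collect each legal cut's cost when 1 <= cost <= B
--     costs = []
--     balance = 0
--     for i in range(n - 1):
--         balance += 1 if a[i] & 1 else -1
--         if balance == 0:
--             cost = abs(a[i] - a[i + 1])
--             if 1 <= cost <= B:
--                 costs.append(cost)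
--     costs.sort()
--     cuts = 0
--     remaining = B
--     for cost in costs:
--         if cost > remaining:
--             break
--         cuts += 1
--         remaining -= cost
--     return cuts
-- ===== Notes on version B (the rewrite author's own statement) =====
-- stated objective: simpler
-- what changed: Replaces the 101-slot counting bucket plus bulk per-cost allocation (min(count, remaining//cost) over every cost 1..B) with a single parity-balance pass that collects the eligible cut costs into a list, sorts it, and takes cuts one by one until the budget runs out.
-- outside the precondition, e.g. on max_cuts_bucket(5, 101, [1, 2, 3, 4, 104]): A returns 2, B returns 2
import Mathlib
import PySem

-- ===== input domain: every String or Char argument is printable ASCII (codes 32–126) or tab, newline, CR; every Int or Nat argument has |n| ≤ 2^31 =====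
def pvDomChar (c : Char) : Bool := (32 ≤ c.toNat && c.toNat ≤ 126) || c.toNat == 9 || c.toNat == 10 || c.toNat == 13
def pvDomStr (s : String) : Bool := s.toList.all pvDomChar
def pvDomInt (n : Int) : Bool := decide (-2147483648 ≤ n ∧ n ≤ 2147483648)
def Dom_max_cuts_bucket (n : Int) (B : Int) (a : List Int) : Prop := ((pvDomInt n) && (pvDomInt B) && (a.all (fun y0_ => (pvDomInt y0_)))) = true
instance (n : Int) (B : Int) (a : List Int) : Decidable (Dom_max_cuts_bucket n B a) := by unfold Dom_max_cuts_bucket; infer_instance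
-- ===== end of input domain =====

-- B replaces A's 101-slot counting bucket + bulk per-cost allocation with collect-the-costs,
-- sort, and a one-by-one greedy walk (objective: simpler).

-- ===== PORT A =====
-- A's bucket array is modelled as a total function Int → Int; Pre_ (B ≤ 100, valid list indices)
-- excludes exactly the inputs where Python's fixed 101-entry list or a[i] would raise IndexError,
-- so the pyGetD defaults are never taken inside Pre_.
def aStep (B : Int) (a : List Int) (st : (Int → Int) × Int × Int) (i : Int) : (Int → Int) × Int × Int :=
  let ai := PySem.List.pyGetD a i 0
  let odd := if PySem.Int.band ai 1 ≠ 0 then st.2.1 + 1 else st.2.1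
  let even := if PySem.Int.band ai 1 ≠ 0 then st.2.2 else st.2.2 + 1
  if odd = even then
    let cost := |ai - PySem.List.pyGetD a (i + 1) 0|
    if cost ≤ B then (Function.update st.1 cost (st.1 cost + 1), odd, even)
    else (st.1, odd, even)
  else (st.1, odd, even)

def aGreedy (bucket : Int → Int) (st : Int × Int × Bool) (cost : Int) : Int × Int × Bool :=
  if st.2.2 then st
  else if bucket cost ≠ 0 then
    let mt := min (bucket cost) (PySem.Int.floordiv st.2.1 cost)
    let cuts := st.1 + mt
    let rem := st.2.1 - mt * cost
    if rem = 0 then (cuts, rem, true) else (cuts, rem, false)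
  else st

def max_cuts_bucket (n : Int) (B : Int) (a : List Int) : Int :=
  let s1 := (PySem.List.pyRange 0 (n - 1) 1).foldl (aStep B a) ((fun _ => 0), 0, 0)
  let bucket := s1.1
  let s2 := (PySem.List.pyRange 1 (B + 1) 1).foldl (aGreedy bucket) (0, B, false)
  s2.1

-- ===== PORT B =====
def bStep (B : Int) (a : List Int) (st : List Int × Int) (i : Int) : List Int × Int :=
  let bal := st.2 + (if PySem.Int.band (PySem.List.pyGetD a i 0) 1 ≠ 0 then 1 else -1)
  if bal = 0 then
    let cost := |PySem.List.pyGetD a i 0 - PySem.List.pyGetD a (i + 1) 0|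
    if 1 ≤ cost ∧ cost ≤ B then (st.1 ++ [cost], bal) else (st.1, bal)
  else (st.1, bal)

def bGreedy (st : Int × Int × Bool) (cost : Int) : Int × Int × Bool :=
  if st.2.2 then st
  else if st.2.1 < cost then (st.1, st.2.1, true)
  else (st.1 + 1, st.2.1 - cost, st.2.2)

def max_cuts_bucket_alt (n : Int) (B : Int) (a : List Int) : Int :=
  let s1 := (PySem.List.pyRange 0 (n - 1) 1).foldl (bStep B a) ([], 0)
  let costs := PySem.List.sorted s1.1 (fun x => x) false
  let s2 := costs.foldl bGreedy (0, B, false)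
  s2.1

-- ===== PRECONDITION & SPEC =====
-- Pre_ excludes B > 100 — there A indexes its fixed 101-entry bucket with costs up to B and raises
-- IndexError except in the rare case the greedy loop exhausts the budget exactly before cost 101 —
-- and n ≥ 2 with n > len(a), where a[i] raises IndexError.
def Pre_max_cuts_bucket (n : Int) (B : Int) (a : List Int) : Prop :=
  B ≤ 100 ∧ (2 ≤ n → n ≤ (a.length : Int))
instance (n : Int) (B : Int) (a : List Int) : Decidable (Pre_max_cuts_bucket n B a) := by
  unfold Pre_max_cuts_bucket; infer_instance

def pvWitness_max_cuts_bucket : Int × Int × List Int := (4, 10, [1, 2, 3, 100])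

def Spec_max_cuts_bucket (n : Int) (B : Int) (a : List Int) (out : Int) : Prop := out = max_cuts_bucket_alt n B a
instance (n : Int) (B : Int) (a : List Int) (out : Int) : Decidable (Spec_max_cuts_bucket n B a out) := by unfold Spec_max_cuts_bucket; infer_instance

-- ===== CLAIM (what is proved, stated in full; the proofs are below) =====
def Claim_equal_max_cuts_bucket : Prop := ∀ (n : Int) (B : Int) (a : List Int), Dom_max_cuts_bucket n B a → Pre_max_cuts_bucket n B a → Spec_max_cuts_bucket n B a (max_cuts_bucket n B a)

-- ===== LEMMAS AND PROOFS =====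

-- Invariant linking A's first pass (bucket, odd, even) to B's first pass (costs, balance).
def InvAB (B : Int) (stA : (Int → Int) × Int × Int) (stB : List Int × Int) : Prop :=
  stB.2 = stA.2.1 - stA.2.2 ∧
  (∀ c : Int, 1 ≤ c → stA.1 c = (stB.1.count c : Int)) ∧
  (∀ x ∈ stB.1, 1 ≤ x ∧ x ≤ B)

lemma stepInv_core (B : Int) (b : Int → Int) (odd even : Int) (costs : List Int) (bal : Int)
    (cost : Int) (hc0 : 0 ≤ cost) (hbal : bal = odd - even)
    (hcnt : ∀ c : Int, 1 ≤ c → b c = (costs.count c : Int))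
    (hmem : ∀ x ∈ costs, 1 ≤ x ∧ x ≤ B) :
    InvAB B
      (if odd = even then
        (if cost ≤ B then (Function.update b cost (b cost + 1), odd, even) else (b, odd, even))
       else (b, odd, even))
      (if bal = 0 then
        (if 1 ≤ cost ∧ cost ≤ B then (costs ++ [cost], bal) else (costs, bal))
       else (costs, bal)) := by
  by_cases heq : odd = even
  · rw [if_pos heq, if_pos (show bal = 0 by omega)]
    by_cases hcB : cost ≤ B
    · rw [if_pos hcB]
      by_cases h1 : 1 ≤ cost
      · rw [if_pos (show 1 ≤ cost ∧ cost ≤ B from ⟨h1, hcB⟩)]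
        refine ⟨by simpa using hbal, ?_, ?_⟩
        · intro c hc
          simp only [List.count_append]
          by_cases hcc : c = cost
          · subst hcc
            rw [Function.update_self]
            simp [hcnt c hc]
          · rw [Function.update_of_ne hcc]
            have hz : List.count c [cost] = 0 := by
              rw [List.count_eq_zero]
              simp
              omega
            simp [hz, hcnt c hc]
        · intro x hx
          rcases List.mem_append.1 hx with hx | hx
          · exact hmem x hx
          · have : x = cost := by simpa using hx
            subst this; exact ⟨h1, hcB⟩
      · rw [if_neg (show ¬(1 ≤ cost ∧ cost ≤ B) by tauto)]
        refine ⟨by simpa using hbal, ?_, hmem⟩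
        intro c hc
        show Function.update b cost (b cost + 1) c = ((costs.count c : Nat) : Int)
        rw [Function.update_of_ne (show c ≠ cost by omega)]
        exact hcnt c hc
    · rw [if_neg hcB, if_neg (show ¬(1 ≤ cost ∧ cost ≤ B) by tauto)]
      exact ⟨by simpa using hbal, hcnt, hmem⟩
  · rw [if_neg heq, if_neg (show ¬bal = 0 by omega)]
    exact ⟨by simpa using hbal, hcnt, hmem⟩

lemma stepInv (B : Int) (a : List Int) (stA : (Int → Int) × Int × Int) (stB : List Int × Int)
    (i : Int) (h : InvAB B stA stB) : InvAB B (aStep B a stA i) (bStep B a stB i) := by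
  obtain ⟨hbal, hcnt, hmem⟩ := h
  show InvAB B
      (if (if PySem.Int.band (PySem.List.pyGetD a i 0) 1 ≠ 0 then stA.2.1 + 1 else stA.2.1)
          = (if PySem.Int.band (PySem.List.pyGetD a i 0) 1 ≠ 0 then stA.2.2 else stA.2.2 + 1) then
        (if |PySem.List.pyGetD a i 0 - PySem.List.pyGetD a (i + 1) 0| ≤ B then
          (Function.update stA.1 (|PySem.List.pyGetD a i 0 - PySem.List.pyGetD a (i + 1) 0|)
            (stA.1 (|PySem.List.pyGetD a i 0 - PySem.List.pyGetD a (i + 1) 0|) + 1),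
           (if PySem.Int.band (PySem.List.pyGetD a i 0) 1 ≠ 0 then stA.2.1 + 1 else stA.2.1),
           (if PySem.Int.band (PySem.List.pyGetD a i 0) 1 ≠ 0 then stA.2.2 else stA.2.2 + 1))
         else (stA.1,
           (if PySem.Int.band (PySem.List.pyGetD a i 0) 1 ≠ 0 then stA.2.1 + 1 else stA.2.1),
           (if PySem.Int.band (PySem.List.pyGetD a i 0) 1 ≠ 0 then stA.2.2 else stA.2.2 + 1)))
       else (stA.1,
           (if PySem.Int.band (PySem.List.pyGetD a i 0) 1 ≠ 0 then stA.2.1 + 1 else stA.2.1),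
           (if PySem.Int.band (PySem.List.pyGetD a i 0) 1 ≠ 0 then stA.2.2 else stA.2.2 + 1)))
      (if stB.2 + (if PySem.Int.band (PySem.List.pyGetD a i 0) 1 ≠ 0 then 1 else -1) = 0 then
        (if 1 ≤ |PySem.List.pyGetD a i 0 - PySem.List.pyGetD a (i + 1) 0| ∧
             |PySem.List.pyGetD a i 0 - PySem.List.pyGetD a (i + 1) 0| ≤ B then
          (stB.1 ++ [|PySem.List.pyGetD a i 0 - PySem.List.pyGetD a (i + 1) 0|],
           stB.2 + (if PySem.Int.band (PySem.List.pyGetD a i 0) 1 ≠ 0 then 1 else -1))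
         else (stB.1, stB.2 + (if PySem.Int.band (PySem.List.pyGetD a i 0) 1 ≠ 0 then 1 else -1)))
       else (stB.1, stB.2 + (if PySem.Int.band (PySem.List.pyGetD a i 0) 1 ≠ 0 then 1 else -1)))
  exact stepInv_core B stA.1 _ _ stB.1 _ _ (abs_nonneg _)
    (by by_cases hb : PySem.Int.band (PySem.List.pyGetD a i 0) 1 ≠ 0 <;> simp [hb] <;> omega)
    hcnt hmem

lemma firstInv (B : Int) (a : List Int) (l : List Int) :
    ∀ (stA : (Int → Int) × Int × Int) (stB : List Int × Int), InvAB B stA stB →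
    InvAB B (l.foldl (aStep B a) stA) (l.foldl (bStep B a) stB) := by
  induction l with
  | nil => intro stA stB h; exact h
  | cons x t ih => intro stA stB h; exact ih _ _ (stepInv B a stA stB x h)

lemma bGreedy_broke (l : List Int) (cuts rem : Int) :
    l.foldl bGreedy (cuts, rem, true) = (cuts, rem, true) := by
  induction l with
  | nil => rfl
  | cons x t ih => simpa [bGreedy] using ih

lemma replFold (lo : Int) (hlo : 1 ≤ lo) :
    ∀ (m : Nat) (cuts rem : Int), 0 ≤ rem →
    (List.replicate m lo).foldl bGreedy (cuts, rem, false)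
      = (cuts + min (m : Int) (rem / lo), rem - min (m : Int) (rem / lo) * lo,
         decide (min (m : Int) (rem / lo) < (m : Int))) := by
  intro m
  induction m with
  | zero =>
    intro cuts rem hrem
    have hq : 0 ≤ rem / lo := Int.ediv_nonneg hrem (by omega)
    simp [min_eq_left hq]
  | succ m ih =>
    intro cuts rem hrem
    have hq : 0 ≤ rem / lo := Int.ediv_nonneg hrem (by omega)
    rw [List.replicate_succ, List.foldl_cons]
    by_cases hlt : rem < lo
    · have hq0 : rem / lo = 0 := Int.ediv_eq_zero_of_lt hrem hlt
      have hstep : bGreedy (cuts, rem, false) lo = (cuts, rem, true) := by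
        simp [bGreedy, hlt]
      rw [hstep, bGreedy_broke]
      have : min ((m : Int) + 1) (rem / lo) = 0 := by rw [hq0]; omega
      simp only [Nat.cast_add, Nat.cast_one, this]
      norm_num
    · rw [not_lt] at hlt
      have hstep : bGreedy (cuts, rem, false) lo = (cuts + 1, rem - lo, false) := by
        simp [bGreedy, not_lt.2 hlt]
      rw [hstep, ih (cuts + 1) (rem - lo) (by omega)]
      have hq1 : 1 ≤ rem / lo := by
        rw [Int.le_ediv_iff_mul_le (by omega)]; omega
      have hsub : (rem - lo) / lo = rem / lo - 1 := by
        have := Int.add_mul_ediv_right rem (-1) (show lo ≠ 0 by omega)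
        rw [show rem + -1 * lo = rem - lo by ring] at this
        omega
      rw [hsub]
      have hmin : min ((m : Int)) (rem / lo - 1) + 1 = min ((m : Int) + 1) (rem / lo) := by omega
      refine Prod.ext ?_ (Prod.ext ?_ ?_) <;> simp only [Nat.cast_add, Nat.cast_one]
      · omega
      · nlinarith [hmin]
      · simp only [decide_eq_decide]; omega

-- splitting a sorted list at its minimum value
lemma sorted_split (lo : Int) : ∀ (cs : List Int), cs.Pairwise (· ≤ ·) → (∀ x ∈ cs, lo ≤ x) →
    ∃ cs', cs = List.replicate (cs.count lo) lo ++ cs' ∧ cs'.Pairwise (· ≤ ·) ∧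
      (∀ x ∈ cs', lo + 1 ≤ x) ∧ (∀ c : Int, lo + 1 ≤ c → cs'.count c = cs.count c) := by
  intro cs
  induction cs with
  | nil => intro _ _; exact ⟨[], by simp⟩
  | cons h t ih =>
    intro hp hlo
    by_cases hh : h = lo
    · subst hh
      obtain ⟨cs', he, hp', hge, hcnt⟩ := ih (hp.tail) (fun x hx => hlo x (List.mem_cons_of_mem _ hx))
      refine ⟨cs', ?_, hp', hge, ?_⟩
      · rw [List.count_cons_self, List.replicate_succ]
        simpa using he
      · intro c hc
        rw [hcnt c hc, List.count_cons_of_ne (by omega)]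
    · have hgt : lo + 1 ≤ h := by have := hlo h (List.mem_cons_self); omega
      have hall : ∀ x ∈ h :: t, lo + 1 ≤ x := by
        intro x hx
        rcases List.mem_cons.1 hx with rfl | hx
        · exact hgt
        · have := List.rel_of_pairwise_cons hp hx; omega
      refine ⟨h :: t, ?_, hp, hall, fun c _ => rfl⟩
      have : (h :: t).count lo = 0 := by
        rw [List.count_eq_zero]
        intro hmem
        have := hall lo hmem; omega
      simp [this]

lemma greedy_eq (Bv : Int) (b : Int → Int) :
    ∀ (k : Nat) (lo : Int) (cs : List Int) (cuts rem : Int) (brA brB : Bool),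
    (Bv + 1 - lo).toNat = k → 1 ≤ lo →
    cs.Pairwise (· ≤ ·) → (∀ x ∈ cs, lo ≤ x ∧ x ≤ Bv) →
    (∀ c : Int, lo ≤ c → b c = (cs.count c : Int)) →
    0 ≤ rem → (brA = true → rem = 0) → (brB = true → rem < lo) →
    ((PySem.List.pyRange lo (Bv + 1) 1).foldl (aGreedy b) (cuts, rem, brA)).1
      = (cs.foldl bGreedy (cuts, rem, brB)).1 := by
  intro k
  induction k with
  | zero =>
    intro lo cs cuts rem brA brB hk hlo hp hb hcount hrem hA hB
    rw [PySem.List.pyRange_one_eq_nil (by omega)]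
    have hcs : cs = [] := by
      rw [List.eq_nil_iff_forall_not_mem]
      intro x hx
      have := hb x hx; omega
    rw [hcs]
    rfl
  | succ k ih =>
    intro lo cs cuts rem brA brB hk hlo hp hb hcount hrem hA hB
    set m := cs.count lo with hm
    obtain ⟨cs', hsplit, hp', hge', hcnt'⟩ := sorted_split lo cs hp (fun x hx => (hb x hx).1)
    have hq0 : 0 ≤ rem / lo := Int.ediv_nonneg hrem (by omega)
    have hblo : b lo = ((m : Nat) : Int) := hcount lo le_rfl
    have hqlo : rem / lo * lo ≤ rem := by
      have h1 := Int.mul_ediv_add_emod rem lo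
      have h2 : 0 ≤ rem % lo := Int.emod_nonneg rem (by omega)
      have h3 : rem / lo * lo = lo * (rem / lo) := mul_comm _ _
      linarith
    set t := min ((m : Nat) : Int) (rem / lo) with ht
    have ht0 : 0 ≤ t := le_min (Int.natCast_nonneg _) hq0
    have htlo : t * lo ≤ rem :=
      le_trans (mul_le_mul_of_nonneg_right (min_le_right _ _) (by omega)) hqlo
    have hrem' : 0 ≤ rem - t * lo := by linarith
    have hAstep : ∃ brA' : Bool, aGreedy b (cuts, rem, brA) lo = (cuts + t, rem - t * lo, brA')
        ∧ (brA' = true → rem - t * lo = 0) := by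
      have e1 : aGreedy b (cuts, rem, false) lo =
          (if b lo ≠ 0 then
            (if rem - min (b lo) (PySem.Int.floordiv rem lo) * lo = 0 then
              (cuts + min (b lo) (PySem.Int.floordiv rem lo),
               rem - min (b lo) (PySem.Int.floordiv rem lo) * lo, true)
             else (cuts + min (b lo) (PySem.Int.floordiv rem lo),
               rem - min (b lo) (PySem.Int.floordiv rem lo) * lo, false))
           else (cuts, rem, false)) := rfl
      cases brA with
      | true =>
        have hr0 : rem = 0 := hA rfl
        have hq' : rem / lo = 0 := by rw [hr0]; simp
        have ht' : t = 0 := by rw [ht, hq']; exact min_eq_right (Int.natCast_nonneg _)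
        refine ⟨true, ?_, fun _ => by rw [ht', hr0]; ring⟩
        show aGreedy b (cuts, rem, true) lo = _
        have e2 : aGreedy b (cuts, rem, true) lo = (cuts, rem, true) := rfl
        rw [e2, ht', hr0]
        norm_num
      | false =>
        have hfd : PySem.Int.floordiv rem lo = rem / lo :=
          PySem.Int.floordiv_eq_ediv_of_pos (by omega)
        by_cases hz : b lo ≠ 0
        · refine ⟨decide (rem - t * lo = 0), ?_, fun hd => of_decide_eq_true hd⟩
          rw [e1, if_pos hz, hfd, hblo, ← ht]
          split_ifs with h <;> simp [h]
        · have hm0 : ((m : Nat) : Int) = 0 := by rw [← hblo]; omega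
          have ht' : t = 0 := by rw [ht, hm0]; exact min_eq_left hq0
          refine ⟨false, ?_, by simp⟩
          rw [e1, if_neg hz, ht']
          norm_num
    have hBstep : ∃ brB' : Bool, (List.replicate m lo).foldl bGreedy (cuts, rem, brB)
        = (cuts + t, rem - t * lo, brB') ∧ (brB' = true → rem - t * lo < lo + 1) := by
      cases brB with
      | true =>
        have hrlo : rem < lo := hB rfl
        have hq' : rem / lo = 0 := Int.ediv_eq_zero_of_lt hrem hrlo
        have ht' : t = 0 := by rw [ht, hq']; exact min_eq_right (Int.natCast_nonneg _)
        refine ⟨true, ?_, fun _ => by rw [ht']; simp only [zero_mul, sub_zero]; omega⟩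
        rw [bGreedy_broke, ht']
        norm_num
      | false =>
        refine ⟨decide (t < ((m : Nat) : Int)), ?_, ?_⟩
        · rw [replFold lo (by omega) m cuts rem hrem, ← ht]
        · intro hd
          have hlt : t < ((m : Nat) : Int) := of_decide_eq_true hd
          have htq : t = rem / lo := by omega
          have hmod : rem - rem / lo * lo = rem % lo := by rw [Int.emod_def]; ring
          have hlt2 := Int.emod_lt_of_pos rem (show 0 < lo by omega)
          rw [htq, hmod]; omega
    obtain ⟨brA', hAeq, hAp⟩ := hAstep
    obtain ⟨brB', hBeq, hBp⟩ := hBstep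
    rw [PySem.List.pyRange_one_cons (by omega), List.foldl_cons, hAeq,
        hsplit, List.foldl_append, hBeq]
    exact ih (lo + 1) cs' (cuts + t) (rem - t * lo) brA' brB' (by omega) (by omega) hp'
      (fun x hx => ⟨hge' x hx, (hb x (by rw [hsplit]; exact List.mem_append_right _ hx)).2⟩)
      (fun c hc => by rw [hcount c (by omega), hcnt' c hc])
      hrem' hAp hBp

-- ===== VERDICT (by name: the statement is the Claim_ definition above) =====
theorem max_cuts_bucket_spec : Claim_equal_max_cuts_bucket := by
  intro n B a _hdom _hpre
  unfold Spec_max_cuts_bucket max_cuts_bucket max_cuts_bucket_alt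
  have hinv := firstInv B a (PySem.List.pyRange 0 (n - 1) 1)
      ((fun _ => 0), 0, 0) ([], 0) (by refine ⟨rfl, ?_, ?_⟩ <;> simp)
  set stA := (PySem.List.pyRange 0 (n - 1) 1).foldl (aStep B a) ((fun _ => 0), 0, 0) with hA
  set stB := (PySem.List.pyRange 0 (n - 1) 1).foldl (bStep B a) ([], 0) with hB
  obtain ⟨-, hcount, hmem⟩ := hinv
  show ((PySem.List.pyRange 1 (B + 1) 1).foldl (aGreedy stA.1) (0, B, false)).1
      = ((PySem.List.sorted stB.1 (fun x => x) false).foldl bGreedy (0, B, false)).1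
  by_cases hBpos : 0 ≤ B
  · refine greedy_eq B stA.1 (B + 1 - 1).toNat 1
      (PySem.List.sorted stB.1 (fun x => x) false) 0 B false false rfl le_rfl ?_ ?_ ?_ hBpos
      (by simp) (by simp)
    · simpa using PySem.List.sorted_pairwise stB.1 (fun x => x)
    · intro x hx
      exact hmem x ((PySem.List.mem_sorted stB.1 (fun x => x) false x).1 hx)
    · intro c hc
      rw [hcount c hc]
      exact congrArg _ ((PySem.List.sorted_perm stB.1 (fun x => x) false).count_eq c).symm
  · have h1 : PySem.List.pyRange 1 (B + 1) 1 = [] :=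
      PySem.List.pyRange_one_eq_nil (by omega)
    have h2 : PySem.List.sorted stB.1 (fun x => x) false = [] := by
      rw [List.eq_nil_iff_forall_not_mem]
      intro x hx
      have := hmem x ((PySem.List.mem_sorted stB.1 (fun x => x) false x).1 hx)
      omega
    rw [h1, h2]
    rfl
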